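-- pv_equiv track=rewrite | github.com/ShivamSharma98769876/S004 | backend/app/services/strategy_eod_report_service.py | _exit_bucket_counts
-- ===== SOURCE A (Python) =====
-- def _exit_bucket_counts(exit_counts: dict[str, int]) -> tuple[int, int, int]:
--     """Map raw reason_code tallies into SL / target / manual buckets (aliases included)."""
--     sl = int(exit_counts.get("SL_HIT", 0))
--     tgt = int(exit_counts.get("TARGET_HIT", 0))
--     manual_keys = (
--         "USER_CLOSE",
--         "MANUAL",
--         "MANUAL_EXECUTE",
--         "USER_EXIT",
--         "MANUAL_CLOSE",
--         "ADMIN_CLOSE",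
--         "ADMIN",
--         "FORCED_EXIT",
--     )
--     manual = sum(int(exit_counts.get(k, 0)) for k in manual_keys)
--     return sl, tgt, manual
-- ===== SOURCE B (Python) =====
-- def _exit_bucket_counts(exit_counts: dict[str, int]) -> tuple[int, int, int]:
--     """Map raw reason_code tallies into SL / target / manual buckets (aliases included)."""
--     manual_keys = {
--         "USER_CLOSE", "MANUAL", "MANUAL_EXECUTE", "USER_EXIT",
--         "MANUAL_CLOSE", "ADMIN_CLOSE", "ADMIN", "FORCED_EXIT",
--     }
--     sl = tgt = manual = 0
--     for key, value in exit_counts.items():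
--         if key == "SL_HIT":
--             sl += int(value)
--         elif key == "TARGET_HIT":
--             tgt += int(value)
--         elif key in manual_keys:
--             manual += int(value)
--     return sl, tgt, manual
-- ===== Notes on version B (the rewrite author's own statement) =====
-- stated objective: alternative
-- what changed: B replaces A's per-key dict probing (one .get per known key, a generator sum over the 8 manual aliases) by a single pass over the dict's items that dispatches each present key into its bucket via a set of manual aliases.
import Mathlib
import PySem

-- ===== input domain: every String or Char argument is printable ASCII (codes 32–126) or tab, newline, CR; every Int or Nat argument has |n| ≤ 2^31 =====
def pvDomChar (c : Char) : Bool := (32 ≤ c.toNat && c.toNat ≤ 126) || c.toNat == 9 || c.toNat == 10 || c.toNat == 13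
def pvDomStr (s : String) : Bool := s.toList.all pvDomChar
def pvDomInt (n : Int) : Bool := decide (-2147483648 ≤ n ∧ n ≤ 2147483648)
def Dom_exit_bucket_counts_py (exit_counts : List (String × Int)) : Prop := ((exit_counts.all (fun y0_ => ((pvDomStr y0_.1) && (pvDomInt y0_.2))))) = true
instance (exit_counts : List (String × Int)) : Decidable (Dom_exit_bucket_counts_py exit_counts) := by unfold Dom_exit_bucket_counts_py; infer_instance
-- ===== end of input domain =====

-- B replaces A's per-known-key dict probing by a single dispatching pass over the present
-- entries (objective: alternative decomposition, same cost class).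

-- ===== PORT A =====
-- dict.get(k, 0) on the association list: first match wins (exact Python dict lookup).
def pyGetD0 (l : List (String × Int)) (k : String) : Int :=
  match l with
  | [] => 0
  | (k', v) :: t => if k' == k then v else pyGetD0 t k

def pvManualKeys : List String :=
  ["USER_CLOSE", "MANUAL", "MANUAL_EXECUTE", "USER_EXIT",
   "MANUAL_CLOSE", "ADMIN_CLOSE", "ADMIN", "FORCED_EXIT"]

def exit_bucket_counts_py (exit_counts : List (String × Int)) : Int × Int × Int :=
  let sl := pyGetD0 exit_counts "SL_HIT"
  let tgt := pyGetD0 exit_counts "TARGET_HIT"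
  let manual := (pvManualKeys.map (fun k => pyGetD0 exit_counts k)).sum
  (sl, tgt, manual)

-- ===== PORT B =====
def exit_bucket_counts_py_alt (exit_counts : List (String × Int)) : Int × Int × Int :=
  let manualSet : PySem.Set String :=
    PySem.Set.ofList ["USER_CLOSE", "MANUAL", "MANUAL_EXECUTE", "USER_EXIT",
                      "MANUAL_CLOSE", "ADMIN_CLOSE", "ADMIN", "FORCED_EXIT"]
  exit_counts.foldl
    (fun (acc : Int × Int × Int) p =>
      if p.1 == "SL_HIT" then (acc.1 + p.2, acc.2.1, acc.2.2)
      else if p.1 == "TARGET_HIT" then (acc.1, acc.2.1 + p.2, acc.2.2)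
      else if PySem.Set.contains manualSet p.1 then (acc.1, acc.2.1, acc.2.2 + p.2)
      else acc)
    (0, 0, 0)

-- ===== PRECONDITION & SPEC =====
-- Pre_ excludes association lists with duplicate keys, which no Python dict can produce
-- (A's first-match .get vs B's summing pass would disagree only on such non-dict lists).
def Pre_exit_bucket_counts_py (exit_counts : List (String × Int)) : Prop :=
  (exit_counts.map Prod.fst).Nodup
instance (exit_counts : List (String × Int)) : Decidable (Pre_exit_bucket_counts_py exit_counts) := by unfold Pre_exit_bucket_counts_py; infer_instance

def pvWitness_exit_bucket_counts_py : (List (String × Int)) :=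
  [("SL_HIT", 2), ("MANUAL", 1), ("OTHER", 4)]

def Spec_exit_bucket_counts_py (exit_counts : List (String × Int)) (out : Int × Int × Int) : Prop := out = exit_bucket_counts_py_alt exit_counts
instance (exit_counts : List (String × Int)) (out : Int × Int × Int) : Decidable (Spec_exit_bucket_counts_py exit_counts out) := by unfold Spec_exit_bucket_counts_py; infer_instance

-- ===== CLAIM (what is proved, stated in full; the proofs are below) =====
def Claim_equal_exit_bucket_counts_py : Prop := ∀ (exit_counts : List (String × Int)), Dom_exit_bucket_counts_py exit_counts → Pre_exit_bucket_counts_py exit_counts → Spec_exit_bucket_counts_py exit_counts (exit_bucket_counts_py exit_counts)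

-- ===== LEMMAS AND PROOFS =====

theorem pyGetD0_not_mem {l : List (String × Int)} {k : String}
    (h : k ∉ l.map Prod.fst) : pyGetD0 l k = 0 := by
  induction l with
  | nil => rfl
  | cons p t ih =>
    simp only [List.map_cons, List.mem_cons, not_or] at h
    simp only [pyGetD0, beq_iff_eq]
    rw [if_neg (fun he => h.1 he.symm), ih h.2]

theorem msum_cons {k : String} {v : Int} {t : List (String × Int)}
    (h0 : pyGetD0 t k = 0) (ks : List String) :
    ((ks.map (fun mk => pyGetD0 ((k, v) :: t) mk)).sum
      = (ks.map (fun mk => pyGetD0 t mk)).sum + (ks.count k : Int) * v) := by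
  induction ks with
  | nil => simp
  | cons mk ks ih =>
    simp only [List.map_cons, List.sum_cons, ih, List.count_cons]
    by_cases hmk : mk = k
    · subst hmk
      simp only [pyGetD0, beq_self_eq_true, if_true, h0]
      push_cast
      ring
    · have : (k == mk) = false := by simpa using fun h => hmk h.symm
      simp only [pyGetD0, this]
      have : (mk == k) = false := by simpa using hmk
      simp only [this]
      push_cast
      ring

theorem pvManualKeys_nodup : pvManualKeys.Nodup := by decide

theorem fold_invariant (l : List (String × Int))
    (hnd : (l.map Prod.fst).Nodup) (sl tgt m : Int) :
    l.foldl
      (fun (acc : Int × Int × Int) p =>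
        if p.1 == "SL_HIT" then (acc.1 + p.2, acc.2.1, acc.2.2)
        else if p.1 == "TARGET_HIT" then (acc.1, acc.2.1 + p.2, acc.2.2)
        else if PySem.Set.contains (PySem.Set.ofList pvManualKeys) p.1 then
          (acc.1, acc.2.1, acc.2.2 + p.2)
        else acc)
      (sl, tgt, m)
    = (sl + pyGetD0 l "SL_HIT", tgt + pyGetD0 l "TARGET_HIT",
       m + (pvManualKeys.map (fun k => pyGetD0 l k)).sum) := by
  induction l generalizing sl tgt m with
  | nil => simp [pyGetD0]
  | cons p t ih =>
    obtain ⟨k, v⟩ := p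
    simp only [List.map_cons, List.nodup_cons] at hnd
    obtain ⟨hk, hnd'⟩ := hnd
    have h0 : pyGetD0 t k = 0 := pyGetD0_not_mem hk
    have hms := msum_cons (v := v) h0 pvManualKeys
    simp only [List.foldl_cons]
    by_cases hsl : k = "SL_HIT"
    · subst hsl
      simp only [beq_self_eq_true, if_true]
      rw [ih hnd']
      have c0 : (pvManualKeys.count "SL_HIT" : Int) = 0 := by decide
      rw [hms, c0]
      simp [pyGetD0, h0]
    · have hb : (k == "SL_HIT") = false := by simpa using hsl
      simp only [hb]
      by_cases htg : k = "TARGET_HIT"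
      · subst htg
        simp only [beq_self_eq_true, if_true]
        rw [ih hnd']
        have c0 : (pvManualKeys.count "TARGET_HIT" : Int) = 0 := by decide
        rw [hms, c0]
        simp [pyGetD0, h0]
      · have hb2 : (k == "TARGET_HIT") = false := by simpa using htg
        simp only [hb2]
        have getcons : ∀ k', k ≠ k' → pyGetD0 ((k, v) :: t) k' = pyGetD0 t k' := by
          intro k' hne
          have : (k == k') = false := by simpa using hne
          simp [pyGetD0, this]
        by_cases hman : k ∈ pvManualKeys
        · have hc : PySem.Set.contains (PySem.Set.ofList pvManualKeys) k = true := by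
            exact (PySem.Set.contains_iff _ _).2 (((PySem.Set.mem_ofList _ _)).2 hman)
          simp only [hc, if_true]
          rw [ih hnd']
          have c1 : pvManualKeys.count k = 1 :=
            List.count_eq_one_of_mem pvManualKeys_nodup hman
          rw [hms, c1, getcons "SL_HIT" hsl, getcons "TARGET_HIT" htg]
          push_cast
          ring_nf
        · have hc : PySem.Set.contains (PySem.Set.ofList pvManualKeys) k = false := by
            rw [Bool.eq_false_iff]
            intro hcc
            exact hman ((PySem.Set.mem_ofList _ _).1 ((PySem.Set.contains_iff _ _).1 hcc))
          simp only [hc]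
          rw [ih hnd']
          have c0 : pvManualKeys.count k = 0 := List.count_eq_zero_of_not_mem hman
          rw [hms, c0, getcons "SL_HIT" hsl, getcons "TARGET_HIT" htg]
          push_cast
          ring_nf

-- ===== VERDICT (by name: the statement is the Claim_ definition above) =====
theorem exit_bucket_counts_py_spec : Claim_equal_exit_bucket_counts_py := by
  intro l _ hpre
  unfold Spec_exit_bucket_counts_py exit_bucket_counts_py exit_bucket_counts_py_alt
  rw [show (PySem.Set.ofList ["USER_CLOSE", "MANUAL", "MANUAL_EXECUTE", "USER_EXIT",
      "MANUAL_CLOSE", "ADMIN_CLOSE", "ADMIN", "FORCED_EXIT"])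
      = PySem.Set.ofList pvManualKeys from rfl]
  rw [fold_invariant l hpre 0 0 0]
  simp
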